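-- pv_equiv track=rewrite | github.com/larngroup/AMP-GenRL | utils/utils.py | compute_dict_atom_token
-- ===== SOURCE A (Python) =====
-- def compute_dict_atom_token(smi):
--      """ This function computes the dictionary that maps atom indexes of a
--          molecule to its token indexes
--      -------
--      Args:
--      - smi (str): iput molecule
--
--      -------
--      Returns:
--      - d (dictionary): Mapping between atom indexes and sequence indexes
--
--      """
--      d = {}
--      aux_tokens = ['<Start>','<Padd>','(', ')', '[', ']', '=', '#', '@', '*', '%','0', '1',
--                        '2','3', '4', '5', '6', '7', '8', '9', '.', '/','\\',
--                        '+', '-']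
--
--      gap = 0
--      for i in range(0,len(smi[0])):
--          symbol = smi[0][i]
--          if symbol not in aux_tokens: # if it is an atom
--              d[i - gap] = i
--          else:
--              gap +=1
--      return d
-- ===== SOURCE B (Python) =====
-- def compute_dict_atom_token(smi):
--     aux_tokens = ['<Start>','<Padd>','(', ')', '[', ']', '=', '#', '@', '*', '%','0', '1',
--                   '2','3', '4', '5', '6', '7', '8', '9', '.', '/','\\',
--                   '+', '-']
--
--     def solve(s):
--         # returns (pairs, atom_count) for the fragment s, with both the atom
--         # indexes (keys) and the character positions (values) relative to s
--         if len(s) == 0: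
--             return [], 0
--         if len(s) == 1:
--             return ([(0, 0)], 1) if s not in aux_tokens else ([], 0)
--         m = len(s) // 2
--         left, la = solve(s[:m])
--         right, ra = solve(s[m:])
--         return left + [(k + la, p + m) for k, p in right], la + ra
--
--     pairs, _ = solve(smi[0])
--     return dict(pairs)
-- ===== Notes on version B (the rewrite author's own statement) =====
-- stated objective: alternative
-- what changed: Replaced A's left-to-right index loop with a running gap accumulator and in-loop dict writes by a divide-and-conquer recursion: split the string in halves, solve each half with positions/keys relative to the fragment, and merge by shifting the right half's keys by the left half's atom count and its positions by the split point.
import Mathlib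
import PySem

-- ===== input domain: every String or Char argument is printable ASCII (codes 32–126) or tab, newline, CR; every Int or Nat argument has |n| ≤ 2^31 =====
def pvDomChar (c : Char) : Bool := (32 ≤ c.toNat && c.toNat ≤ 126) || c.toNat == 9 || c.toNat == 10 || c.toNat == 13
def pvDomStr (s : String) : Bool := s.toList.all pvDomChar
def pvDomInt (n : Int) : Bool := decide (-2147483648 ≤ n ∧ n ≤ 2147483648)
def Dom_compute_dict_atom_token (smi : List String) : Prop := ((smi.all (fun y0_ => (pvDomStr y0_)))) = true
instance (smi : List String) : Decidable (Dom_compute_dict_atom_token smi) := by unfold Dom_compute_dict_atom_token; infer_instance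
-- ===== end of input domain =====

-- B replaces A's left-to-right index loop (running gap accumulator + in-loop dict writes) by a
-- divide-and-conquer recursion that merges half-results by shifting keys/positions; same return value.

-- ===== PORT A =====
def pvAuxTokens : List String :=
  ["<Start>", "<Padd>", "(", ")", "[", "]", "=", "#", "@", "*", "%", "0", "1",
   "2", "3", "4", "5", "6", "7", "8", "9", ".", "/", "\\", "+", "-"]

def compute_dict_atom_token (smi : List String) : List (Int × Int) :=
  let s0 := PySem.List.pyGetD smi 0 ""            -- smi[0]; in range under Pre_
  let res := (PySem.List.pyRange 0 (PySem.Str.len s0) 1).foldl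
    (fun (st : PySem.Dict Int Int × Int) i =>
      let symbol := String.mk [PySem.List.pyGetD s0.toList i ' ']   -- smi[0][i]; i in range by the loop bound
      if !(pvAuxTokens.contains symbol) then (st.1.insert (i - st.2) i, st.2)
      else (st.1, st.2 + 1))
    (PySem.Dict.empty, 0)
  res.1.items

-- ===== PORT B =====
-- solve(s): pairs (atom-key, char-position) relative to the fragment, and its atom count
def pvSolve : List Char → List (Int × Int) × Int
  | [] => ([], 0)
  | [c] => if !(pvAuxTokens.contains (String.mk [c])) then ([((0 : Int), (0 : Int))], 1) else ([], 0)
  | c1 :: c2 :: rest =>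
    let s := c1 :: c2 :: rest
    let m := s.length / 2
    let L := pvSolve (s.take m)
    let R := pvSolve (s.drop m)
    (L.1 ++ R.1.map (fun p => (p.1 + L.2, p.2 + (m : Int))), L.2 + R.2)
termination_by cs => cs.length
decreasing_by all_goals (simp [List.length_take, List.length_drop]; omega)

def compute_dict_atom_token_alt (smi : List String) : List (Int × Int) :=
  let s0 := PySem.List.pyGetD smi 0 ""            -- smi[0]; in range under Pre_
  (PySem.Dict.ofList (pvSolve s0.toList).1).items   -- dict(pairs)

-- ===== PRECONDITION & SPEC =====
-- Python's smi[0] raises IndexError on an empty list; that is all Pre_ excludes.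
def Pre_compute_dict_atom_token (smi : List String) : Prop := smi ≠ []
instance (smi : List String) : Decidable (Pre_compute_dict_atom_token smi) := by
  unfold Pre_compute_dict_atom_token; infer_instance
def pvWitness_compute_dict_atom_token : List String := ["CC(=O)N"]

def Spec_compute_dict_atom_token (smi : List String) (out : List (Int × Int)) : Prop :=
  out = compute_dict_atom_token_alt smi
instance (smi : List String) (out : List (Int × Int)) : Decidable (Spec_compute_dict_atom_token smi out) := by
  unfold Spec_compute_dict_atom_token; infer_instance

-- ===== CLAIM (what is proved, stated in full; the proofs are below) =====
def Claim_equal_compute_dict_atom_token : Prop :=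
  ∀ (smi : List String), Dom_compute_dict_atom_token smi →
    Pre_compute_dict_atom_token smi →
    Spec_compute_dict_atom_token smi (compute_dict_atom_token smi)

-- ===== LEMMAS AND PROOFS =====

-- The atom positions of cs, counted from offset s (reference shape both proofs reduce to).
def pvPos (cs : List Char) (s : Int) : List Int :=
  match cs with
  | [] => []
  | c :: cs => if !(pvAuxTokens.contains (String.mk [c])) then s :: pvPos cs (s + 1) else pvPos cs (s + 1)

theorem pvPos_append (xs ys : List Char) :
    ∀ s, pvPos (xs ++ ys) s = pvPos xs s ++ pvPos ys (s + xs.length) := by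
  induction xs with
  | nil => intro s; simp [pvPos]
  | cons c xs ih =>
    intro s
    simp only [List.cons_append, pvPos, ih, List.length_cons]
    split_ifs <;> simp <;> ring_nf

theorem pvPos_shift (cs : List Char) :
    ∀ s t : Int, pvPos cs (s + t) = (pvPos cs s).map (· + t) := by
  induction cs with
  | nil => intro s t; simp [pvPos]
  | cons c cs ih =>
    intro s t
    simp only [pvPos]
    split_ifs with h
    · simp only [List.map_cons]
      rw [show s + t + 1 = (s + 1) + t from by ring, ih]
    · rw [show s + t + 1 = (s + 1) + t from by ring, ih]

-- enumerate shifted by t, with the elements shifted by m: the merge step's shape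
theorem pv_enum_shift {f : Int → Int} (xs : List Int) :
    ∀ s t : Int, PySem.List.enumerate (xs.map f) (s + t)
      = (PySem.List.enumerate xs s).map (fun p => (p.1 + t, f p.2)) := by
  induction xs with
  | nil => intro s t; simp [PySem.List.enumerate]
  | cons x xs ih =>
    intro s t
    simp only [List.map_cons, PySem.List.enumerate_cons, List.map_cons]
    rw [show s + t + 1 = (s + 1) + t from by ring, ih]

-- Characterisation of B's divide-and-conquer: pvSolve cs = (enumerate (atom positions), atom count).
theorem pvSolve_eq (cs : List Char) :
    pvSolve cs = (PySem.List.enumerate (pvPos cs 0) 0, ((pvPos cs 0).length : Int)) := by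
  induction cs using pvSolve.induct with
  | case1 => simp [pvSolve, pvPos]
  | case2 c h =>
    simp only [Bool.not_eq_eq_eq_not, Bool.not_true, List.contains_eq_mem, decide_eq_false_iff_not] at h
    simp [pvSolve, pvPos, h, PySem.List.enumerate]
  | case3 c h =>
    simp only [Bool.not_eq_eq_eq_not, Bool.not_true, List.contains_eq_mem, decide_eq_false_iff_not,
      Decidable.not_not] at h
    simp [pvSolve, pvPos, h]
  | case4 c1 c2 rest sv mv ihL ihR =>
    have hL : pvSolve ((c1 :: c2 :: rest).take ((c1 :: c2 :: rest).length / 2))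
        = (PySem.List.enumerate (pvPos ((c1 :: c2 :: rest).take ((c1 :: c2 :: rest).length / 2)) 0) 0,
           ((pvPos ((c1 :: c2 :: rest).take ((c1 :: c2 :: rest).length / 2)) 0).length : Int)) := ihL
    have hR : pvSolve ((c1 :: c2 :: rest).drop ((c1 :: c2 :: rest).length / 2))
        = (PySem.List.enumerate (pvPos ((c1 :: c2 :: rest).drop ((c1 :: c2 :: rest).length / 2)) 0) 0,
           ((pvPos ((c1 :: c2 :: rest).drop ((c1 :: c2 :: rest).length / 2)) 0).length : Int)) := ihR
    simp only [pvSolve, hL, hR]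
    have hsplit : (c1 :: c2 :: rest) = (c1 :: c2 :: rest).take ((c1 :: c2 :: rest).length / 2)
        ++ (c1 :: c2 :: rest).drop ((c1 :: c2 :: rest).length / 2) := (List.take_append_drop _ _).symm
    set s := c1 :: c2 :: rest with hs
    set m := s.length / 2 with hm
    have hlen : (s.take m).length = m := by
      simp [List.length_take]; omega
    have hpos : pvPos s 0 = pvPos (s.take m) 0 ++ (pvPos (s.drop m) 0).map (· + (m : Int)) := by
      conv_lhs => rw [hsplit]
      rw [pvPos_append, hlen]
      congr 1
      rw [show ((0 : Int) + (m : Int)) = 0 + (m : Int) from rfl, pvPos_shift]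
    refine Prod.ext ?_ ?_
    · simp only [hpos, PySem.List.enumerate_append]
      congr 1
      rw [pv_enum_shift]
    · simp [hpos]

-- Keys of B's pair list are 0,1,2,… (strictly increasing), so dict() keeps every pair.
theorem pv_items_ofList_of_nodup_keys (pairs : List (Int × Int))
    (h : (pairs.map (·.1)).Nodup) : (PySem.Dict.ofList pairs).items = pairs := by
  have h1 : ∀ a ∈ pairs, (PySem.Dict.empty : PySem.Dict Int Int).contains (a.1) = false := by
    intro a _; simp [PySem.Dict.contains_empty]
  have h2 := PySem.Dict.items_foldl_insert_fresh (l := pairs)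
      (k := fun p : Int × Int => p.1) (v := fun p : Int × Int => p.2)
      (d := PySem.Dict.empty) h1 h
  simpa [PySem.Dict.ofList, PySem.Dict.update, PySem.Dict.empty] using h2

-- A's loop over range(len) is the fold over enumerate.
theorem pv_foldRange_enum {α σ : Type} [Inhabited α] (ys : List α) (dflt : α)
    (f : σ → Int → α → σ) :
    ∀ (k : Nat) (init : σ),
      (PySem.List.pyRange k ys.length 1).foldl
          (fun st i => f st i (PySem.List.pyGetD ys i dflt)) init
        = (PySem.List.enumerate (ys.drop k) k).foldl (fun st p => f st p.1 p.2) init := by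
  intro k
  induction hn : ys.length - k generalizing k with
  | zero =>
    intro init
    have hk : ys.length ≤ k := by omega
    rw [PySem.List.pyRange_one_eq_nil (by exact_mod_cast hk), List.drop_eq_nil_of_le hk]
    simp [PySem.List.enumerate]
  | succ n ih =>
    intro init
    have hk : k < ys.length := by omega
    rw [PySem.List.pyRange_one_cons (by exact_mod_cast hk)]
    have hdrop : ys.drop k = ys[k] :: ys.drop (k+1) := (List.getElem_cons_drop hk).symm
    rw [hdrop, PySem.List.enumerate_cons]
    simp only [List.foldl_cons, PySem.List.pyGetD_natCast, List.getD_eq_getElem ys dflt hk]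
    have := ih (k+1) (by omega) (f init (↑k) ys[k])
    rw [show ((k:Int)+1) = ((k+1:Nat):Int) by push_cast; ring]
    exact this

-- Core invariant of A's loop: the dict collects exactly enumerate (pvPos cs s) (s - gap).
theorem pv_core (cs : List Char) :
    ∀ (s gap : Int) (d : PySem.Dict Int Int),
      (∀ p ∈ d.items, p.1 < s - gap) →
      ((PySem.List.enumerate cs s).foldl
          (fun (st : PySem.Dict Int Int × Int) p =>
            if !(pvAuxTokens.contains (String.mk [p.2])) then (st.1.insert (p.1 - st.2) p.1, st.2)
            else (st.1, st.2 + 1))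
          (d, gap)).1.items
        = d.items ++ PySem.List.enumerate (pvPos cs s) (s - gap) := by
  induction cs with
  | nil => intro s gap d _; simp [PySem.List.enumerate, pvPos]
  | cons c cs ih =>
    intro s gap d hd
    rw [PySem.List.enumerate_cons]
    simp only [List.foldl_cons, pvPos]
    by_cases hp : (!(pvAuxTokens.contains (String.mk [c]))) = true
    · simp only [hp, if_pos]
      have hnc : d.contains (s - gap) = false := by
        by_contra h
        have : d.contains (s - gap) = true := by revert h; cases d.contains (s-gap) <;> simp
        have hm : (s - gap) ∈ d.keys := (PySem.Dict.contains_iff_mem_keys _ _).mp this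
        simp only [PySem.Dict.keys, List.mem_map] at hm
        obtain ⟨p, hpm, hpe⟩ := hm
        have := hd p hpm
        omega
      have hins : (d.insert (s - gap) s).items = d.items ++ [(s - gap, s)] :=
        PySem.Dict.items_insert_of_not_contains d s hnc
      have hd' : ∀ p ∈ (d.insert (s - gap) s).items, p.1 < (s+1) - gap := by
        intro p hpm
        rw [hins] at hpm
        rcases List.mem_append.mp hpm with h | h
        · have := hd p h; omega
        · obtain rfl := List.mem_singleton.mp h; simp
      rw [ih (s+1) gap _ hd', hins]
      rw [PySem.List.enumerate_cons, List.append_assoc, List.singleton_append,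
        show (s+1) - gap = (s - gap) + 1 from by ring]
    · have hp' : (!(pvAuxTokens.contains (String.mk [c]))) = false := by
        revert hp; cases (!(pvAuxTokens.contains (String.mk [c]))) <;> simp
      simp only [hp', Bool.false_eq_true, if_neg, not_false_iff]
      have hd' : ∀ p ∈ d.items, p.1 < (s+1) - (gap+1) := by intro p h; have := hd p h; omega
      rw [ih (s+1) (gap+1) d hd']
      rw [show (s+1) - (gap+1) = s - gap by ring]

theorem pv_main (smi : List String) :
    compute_dict_atom_token smi = compute_dict_atom_token_alt smi := by
  unfold compute_dict_atom_token compute_dict_atom_token_alt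
  simp only [PySem.Str.len_eq]
  set cs := (PySem.List.pyGetD smi 0 "").toList with hcs
  have h1 := pv_foldRange_enum cs ' '
      (fun (st : PySem.Dict Int Int × Int) i a =>
        if !(pvAuxTokens.contains (String.mk [a])) then (st.1.insert (i - st.2) i, st.2)
        else (st.1, st.2 + 1)) 0 (PySem.Dict.empty, 0)
  simp only [Nat.cast_zero, List.drop_zero] at h1
  rw [h1, pv_core cs 0 0 PySem.Dict.empty (by simp [PySem.Dict.empty])]
  rw [pvSolve_eq, pv_items_ofList_of_nodup_keys]
  · simp [PySem.Dict.empty]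
  · have hpw := PySem.List.pairwise_lt_enumerate (pvPos cs 0) 0
    exact ((List.pairwise_map.mpr hpw).imp fun hlt => ne_of_lt hlt)

-- ===== VERDICT (by name: the statement is the Claim_ definition above) =====
theorem compute_dict_atom_token_spec : Claim_equal_compute_dict_atom_token := by
  intro smi _ _
  unfold Spec_compute_dict_atom_token
  exact pv_main smi
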